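-- pv_equiv track=rewrite | github.com/AlexanderSchneier/TryMark.AI | knowledge/build_knowledge_base.py | split_by_channel
-- ===== SOURCE A (Python) =====
-- DISCLOSURE_CHANNELS = [
--     "POINT OF SALE",
--     "PRINT",
--     "WEB",
--     "EMAIL",
--     "FACEBOOK",
--     "INSTAGRAM",
--     "TIKTOK",
--     "TWITTER",
--     "X (FORMERLY TWITTER)",
--     "X"
-- ]
--
-- def split_by_channel(text):
--     chunks = {}
--     current = None
--
--     for line in text.splitlines():
--         normalized = line.strip().upper()
--
--         if normalized in DISCLOSURE_CHANNELS:
--             current = normalized.lower()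
--             chunks[current] = []
--         elif current:
--             chunks[current].append(line)
--
--     return {
--         k: "\n".join(v).strip()
--         for k, v in chunks.items()
--         if "\n".join(v).strip()
--     }
-- ===== SOURCE B (Python) =====
-- DISCLOSURE_CHANNELS = [
--     "POINT OF SALE",
--     "PRINT",
--     "WEB",
--     "EMAIL",
--     "FACEBOOK",
--     "INSTAGRAM",
--     "TIKTOK",
--     "TWITTER",
--     "X (FORMERLY TWITTER)",
--     "X"
-- ]
--
-- _CHANNEL_SET = set(DISCLOSURE_CHANNELS)
--
--
-- def split_by_channel(text):
--     # Two-level scan: jump from header to header, consuming each body as a block,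
--     # instead of A's line-by-line state machine with a `current` register.
--     lines = text.splitlines()
--     n = len(lines)
--     out = {}
--     i = 0
--     while i < n:
--         name = lines[i].strip().upper()
--         if name not in _CHANNEL_SET:
--             i += 1
--             continue
--         j = i + 1
--         while j < n and lines[j].strip().upper() not in _CHANNEL_SET:
--             j += 1
--         out[name.lower()] = "\n".join(lines[i + 1:j]).strip()
--         i = j
--     return {k: v for k, v in out.items() if v}
-- ===== Notes on version B (the rewrite author's own statement) =====
-- stated objective: alternative
-- what changed: Replaces A's line-by-line state machine (a `current` register plus per-line appends into dict-held lists) with a two-level scan that jumps from header to header, slices each body out as a block, joins it once, and writes the finished string into the dict.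
import Mathlib
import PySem

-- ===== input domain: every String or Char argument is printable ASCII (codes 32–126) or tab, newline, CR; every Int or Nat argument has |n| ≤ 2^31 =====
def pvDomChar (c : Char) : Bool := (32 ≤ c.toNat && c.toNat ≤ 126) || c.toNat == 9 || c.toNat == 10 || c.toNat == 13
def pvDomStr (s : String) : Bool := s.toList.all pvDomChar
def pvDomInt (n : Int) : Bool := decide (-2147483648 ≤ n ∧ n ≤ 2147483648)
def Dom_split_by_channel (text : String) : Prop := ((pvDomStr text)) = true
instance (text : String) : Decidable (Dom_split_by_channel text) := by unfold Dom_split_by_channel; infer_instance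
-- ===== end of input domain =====

-- B replaces A's line-by-line state machine with a two-level header-to-header scan that
-- slices each body out as a block (objective: alternative decomposition, same cost).

def pvDISCLOSURE_CHANNELS : List String :=
  ["POINT OF SALE", "PRINT", "WEB", "EMAIL", "FACEBOOK", "INSTAGRAM", "TIKTOK",
   "TWITTER", "X (FORMERLY TWITTER)", "X"]

-- ===== PORT A =====
-- the body of A's `for line in text.splitlines():` loop; state = (chunks, current)
def pvAStep (st : PySem.Dict String (List String) × Option String) (line : String) :
    PySem.Dict String (List String) × Option String :=
  let normalized := PySem.Str.upper (PySem.Str.strip line)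
  if pvDISCLOSURE_CHANNELS.contains normalized then
    let cur := PySem.Str.lower normalized
    (st.1.insert cur [], some cur)
  else
    match st.2 with
    | some current => (st.1.modify current [] (fun v => v ++ [line]), some current)
    | none => st

def split_by_channel (text : String) : List (String × String) :=
  let chunks := (PySem.Str.splitlines text).foldl pvAStep (PySem.Dict.empty, none)
  (chunks.1.items.filter
      (fun p => PySem.Str.strip (PySem.Str.join "\n" p.2) != "")).map
    (fun p => (p.1, PySem.Str.strip (PySem.Str.join "\n" p.2)))

-- ===== PORT B =====
def pvCHANNEL_SET : PySem.Set String := PySem.Set.ofList pvDISCLOSURE_CHANNELS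

-- Source B's outer `while i < n` loop as recursion over the remaining lines; the inner
-- `while j < n and …` index loop is the takeWhile/dropWhile split of the same suffix.
def pvAltScan (out : PySem.Dict String String) : List String → PySem.Dict String String
  | [] => out
  | line :: rest =>
    let name := PySem.Str.upper (PySem.Str.strip line)
    if pvCHANNEL_SET.contains name then
      let body := rest.takeWhile (fun l => !(pvCHANNEL_SET.contains (PySem.Str.upper (PySem.Str.strip l))))
      pvAltScan (out.insert (PySem.Str.lower name) (PySem.Str.strip (PySem.Str.join "\n" body)))
        (rest.dropWhile (fun l => !(pvCHANNEL_SET.contains (PySem.Str.upper (PySem.Str.strip l)))))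
    else pvAltScan out rest
  termination_by l => l.length
  decreasing_by
    · simp only [List.length_cons]
      exact Nat.lt_succ_of_le (List.length_dropWhile_le _ _)
    · simp

def split_by_channel_alt (text : String) : List (String × String) :=
  (pvAltScan PySem.Dict.empty (PySem.Str.splitlines text)).items.filter (fun p => p.2 != "")

-- ===== PRECONDITION & SPEC =====
def Spec_split_by_channel (text : String) (out : List (String × String)) : Prop := out = split_by_channel_alt text
instance (text : String) (out : List (String × String)) : Decidable (Spec_split_by_channel text out) := by unfold Spec_split_by_channel; infer_instance

-- ===== CLAIM (what is proved, stated in full; the proofs are below) =====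
def Claim_equal_split_by_channel : Prop := ∀ (text : String), Dom_split_by_channel text → Spec_split_by_channel text (split_by_channel text)

-- ===== LEMMAS AND PROOFS =====

-- is this line a channel header?
def pvIsH (l : String) : Bool := pvDISCLOSURE_CHANNELS.contains (PySem.Str.upper (PySem.Str.strip l))

-- the segment list: (lowercased header name, raw body lines) per header occurrence, in order
def pvSegs : List String → List (String × List String)
  | [] => []
  | line :: rest =>
    if pvIsH line then
      (PySem.Str.lower (PySem.Str.upper (PySem.Str.strip line)), rest.takeWhile (fun l => !pvIsH l))
        :: pvSegs (rest.dropWhile (fun l => !pvIsH l))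
    else pvSegs rest
  termination_by l => l.length
  decreasing_by
    · simp only [List.length_cons]
      exact Nat.lt_succ_of_le (List.length_dropWhile_le _ _)
    · simp

def pvJoin (v : List String) : String := PySem.Str.strip (PySem.Str.join "\n" v)

def pvVm (d : PySem.Dict String (List String)) : PySem.Dict String String :=
  PySem.Dict.mk (d.items.map (fun p => (p.1, pvJoin p.2)))

lemma pvSet_eq : pvCHANNEL_SET = pvDISCLOSURE_CHANNELS := by decide

lemma pvModify_insert (d : PySem.Dict String (List String)) (k : String) (v : List String)
    (f : List String → List String) :
    (d.insert k v).modify k [] f = d.insert k (f v) := by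
  simp [PySem.Dict.modify, PySem.Dict.getD_insert_self, PySem.Dict.insert_insert_self]

lemma pvBodyFold (pre : List String) (h : ∀ l ∈ pre, pvIsH l = false) :
    ∀ (d : PySem.Dict String (List String)) (c : String),
      pre.foldl pvAStep (d, some c) =
        (pre.foldl (fun d l => d.modify c [] (fun v => v ++ [l])) d, some c) := by
  revert h
  induction pre with
  | nil => intro _ d c; simp
  | cons l pre ih =>
    intro h d c
    have hl : pvIsH l = false := h l (by simp)
    have hpre : ∀ l' ∈ pre, pvIsH l' = false := fun l' hm => h l' (by simp [hm])
    simp only [List.foldl_cons]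
    have hl' : PySem.Str.upper (PySem.Str.strip l) ∉ pvDISCLOSURE_CHANNELS := by
      unfold pvIsH at hl; simpa using hl
    rw [show pvAStep (d, some c) l = (d.modify c [] (fun v => v ++ [l]), some c) from by
      simp [pvAStep, hl']]
    exact ih hpre _ _

lemma pvFoldModifyInsert (pre : List String) :
    ∀ (d : PySem.Dict String (List String)) (c : String) (v : List String),
      pre.foldl (fun d l => d.modify c [] (fun w => w ++ [l])) (d.insert c v) =
        d.insert c (v ++ pre) := by
  induction pre with
  | nil => simp
  | cons l pre ih =>
    intro d c v
    simp only [List.foldl_cons]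
    rw [pvModify_insert, ih]
    simp

lemma pvHeadHeader (rs : List String)
    (h : ∀ x xs, rs = x :: xs → pvIsH x = true) (d : PySem.Dict String (List String)) {c : Option String} :
    (rs.foldl pvAStep (d, c)).1 = (rs.foldl pvAStep (d, none)).1 := by
  cases rs with
  | nil => simp
  | cons x xs =>
    have hx : PySem.Str.upper (PySem.Str.strip x) ∈ pvDISCLOSURE_CHANNELS := by
      have := h x xs rfl; unfold pvIsH at this; simpa using this
    simp only [List.foldl_cons]
    rw [show pvAStep (d, c) x = pvAStep (d, none) x from by simp [pvAStep, hx]]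

lemma pvLemA (lines : List String) :
    ∀ (d : PySem.Dict String (List String)),
      (lines.foldl pvAStep (d, none)).1 =
        (pvSegs lines).foldl (fun d p => d.insert p.1 p.2) d := by
  induction lines using pvSegs.induct with
  | case1 => intro d; simp [pvSegs]
  | case2 line rest hh ih =>
    intro d
    have hmem : PySem.Str.upper (PySem.Str.strip line) ∈ pvDISCLOSURE_CHANNELS := by
      unfold pvIsH at hh; simpa using hh
    simp only [List.foldl_cons]
    rw [show pvAStep (d, none) line =
        (d.insert (PySem.Str.lower (PySem.Str.upper (PySem.Str.strip line))) [],
         some (PySem.Str.lower (PySem.Str.upper (PySem.Str.strip line)))) from by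
      simp [pvAStep, hmem]]
    rw [show rest = rest.takeWhile (fun l => !pvIsH l) ++ rest.dropWhile (fun l => !pvIsH l) from
      (List.takeWhile_append_dropWhile).symm]
    rw [List.foldl_append]
    rw [pvBodyFold _ (fun l hm => by simpa using List.mem_takeWhile_imp hm) _ _]
    rw [pvFoldModifyInsert]
    simp only [List.nil_append]
    rw [pvHeadHeader _ (fun x xs hx => by
      have h2 : List.dropWhile (fun l => !pvIsH l) rest ≠ [] := by simp [hx]
      have := List.head_dropWhile_not (l := rest) (fun l => !pvIsH l) h2
      simp only [hx, List.head_cons] at this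
      simpa using this)]
    rw [ih _]
    conv_rhs => rw [List.takeWhile_append_dropWhile]
    rw [show pvSegs (line :: rest) =
        (PySem.Str.lower (PySem.Str.upper (PySem.Str.strip line)), rest.takeWhile (fun l => !pvIsH l))
          :: pvSegs (rest.dropWhile (fun l => !pvIsH l)) from by
      conv_lhs => rw [pvSegs]
      simp [hh]]
    simp only [List.foldl_cons]
  | case3 line rest hh ih =>
    intro d
    have hmem : PySem.Str.upper (PySem.Str.strip line) ∉ pvDISCLOSURE_CHANNELS := by
      unfold pvIsH at hh; simpa using hh
    simp only [List.foldl_cons]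
    rw [show pvAStep (d, none) line = (d, none) from by simp [pvAStep, hmem]]
    rw [ih _]
    congr 1
    conv_rhs => rw [pvSegs]
    simp [hh]

lemma pvLemB (lines : List String) :
    ∀ (d : PySem.Dict String String),
      pvAltScan d lines =
        ((pvSegs lines).map (fun p => (p.1, pvJoin p.2))).foldl (fun d p => d.insert p.1 p.2) d := by
  induction lines using pvSegs.induct with
  | case1 => intro d; simp [pvAltScan, pvSegs]
  | case2 line rest hh ih =>
    intro d
    have hmem : PySem.Str.upper (PySem.Str.strip line) ∈ pvDISCLOSURE_CHANNELS := by
      unfold pvIsH at hh; simpa using hh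
    rw [show pvAltScan d (line :: rest) =
        pvAltScan (d.insert (PySem.Str.lower (PySem.Str.upper (PySem.Str.strip line)))
            (pvJoin (rest.takeWhile (fun l => !pvIsH l)))) (rest.dropWhile (fun l => !pvIsH l)) from by
      conv_lhs => rw [pvAltScan]
      rw [pvSet_eq]
      simp [pvIsH, pvJoin, hmem]]
    rw [ih _]
    conv_rhs => rw [pvSegs]
    simp only [hh, if_true, List.map_cons, List.foldl_cons]
  | case3 line rest hh ih =>
    intro d
    have hmem : PySem.Str.upper (PySem.Str.strip line) ∉ pvDISCLOSURE_CHANNELS := by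
      unfold pvIsH at hh; simpa using hh
    rw [show pvAltScan d (line :: rest) = pvAltScan d rest from by
      conv_lhs => rw [pvAltScan]
      rw [pvSet_eq]
      simp [hmem]]
    rw [ih _]
    conv_rhs => rw [pvSegs]
    simp [hh]

lemma pvVm_insert (d : PySem.Dict String (List String)) (k : String) (v : List String) :
    pvVm (d.insert k v) = (pvVm d).insert k (pvJoin v) := by
  unfold pvVm PySem.Dict.insert PySem.Dict.contains
  simp only [List.any_map, List.map_map, Function.comp_def]
  split_ifs with hc
  · congr 1
    simp only [List.map_map]
    apply List.map_congr_left
    intro p _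
    by_cases hp : p.1 = k <;> simp [hp]
  · simp

lemma pvLemMap (segs : List (String × List String)) :
    ∀ (d : PySem.Dict String (List String)),
      (segs.map (fun p => (p.1, pvJoin p.2))).foldl (fun d p => d.insert p.1 p.2) (pvVm d) =
        pvVm (segs.foldl (fun d p => d.insert p.1 p.2) d) := by
  induction segs with
  | nil => simp
  | cons s segs ih =>
    intro d
    simp only [List.map_cons, List.foldl_cons]
    rw [← pvVm_insert]
    exact ih _

-- ===== VERDICT (by name: the statement is the Claim_ definition above) =====
theorem split_by_channel_spec : Claim_equal_split_by_channel := by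
  intro text _
  unfold Spec_split_by_channel split_by_channel split_by_channel_alt
  show List.map (fun p => (p.1, PySem.Str.strip (PySem.Str.join "\n" p.2)))
      (List.filter (fun p => PySem.Str.strip (PySem.Str.join "\n" p.2) != "")
        ((List.foldl pvAStep (PySem.Dict.empty, none) (PySem.Str.splitlines text)).1.items)) =
    List.filter (fun p => p.2 != "") (pvAltScan PySem.Dict.empty (PySem.Str.splitlines text)).items
  rw [pvLemA, pvLemB]
  rw [show (PySem.Dict.empty : PySem.Dict String String) = pvVm PySem.Dict.empty from rfl]
  rw [pvLemMap]
  rw [show (pvVm ((pvSegs (PySem.Str.splitlines text)).foldl (fun d p => d.insert p.1 p.2) PySem.Dict.empty)).items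
      = ((pvSegs (PySem.Str.splitlines text)).foldl (fun d p => d.insert p.1 p.2) PySem.Dict.empty).items.map
          (fun p => (p.1, pvJoin p.2)) from rfl]
  rw [List.filter_map]
  simp [pvJoin, Function.comp_def]
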